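-- pv_equiv track=rewrite | github.com/Estuardo07/Lab_C | metodos.py | new_txt
-- ===== SOURCE A (Python) =====
-- def new_txt(cadena, a_reemplazar, nuevo_texto):
--     lista_cadena = list(cadena)
--     lista_a_reemplazar = list(a_reemplazar)
--     lista_nuevo_texto = list(nuevo_texto)
--     len_a_reemplazar = len(lista_a_reemplazar)
--     len_nuevo_texto = len(lista_nuevo_texto)
--     len_cadena = len(lista_cadena)
--
--     i = 0
--     while i < len_cadena:
--         if lista_cadena[i:i+len_a_reemplazar] == lista_a_reemplazar:
--             lista_cadena[i:i+len_a_reemplazar] = lista_nuevo_texto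
--             len_cadena = len_cadena - len_a_reemplazar + len_nuevo_texto
--             i = i + len_nuevo_texto
--         else:
--             i = i + 1
--
--     return ''.join(lista_cadena)
-- ===== SOURCE B (Python) =====
-- def new_txt(cadena, a_reemplazar, nuevo_texto):
--     pieces = []
--     start = 0
--     while True:
--         idx = cadena.find(a_reemplazar, start)
--         if idx == -1:
--             pieces.append(cadena[start:])
--             break
--         pieces.append(cadena[start:idx])
--         pieces.append(nuevo_texto)
--         start = idx + len(a_reemplazar)
--     return ''.join(pieces)
-- ===== Notes on version B (the rewrite author's own statement) =====
-- stated objective: faster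
-- what changed: B jumps between matches with str.find and joins accumulated segments instead of scanning char-by-char and splicing a mutable char list at every position.
-- outside the precondition, e.g. on new_txt('', '', 'x'): A returns '', B does not finish within the time limit
import Mathlib
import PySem

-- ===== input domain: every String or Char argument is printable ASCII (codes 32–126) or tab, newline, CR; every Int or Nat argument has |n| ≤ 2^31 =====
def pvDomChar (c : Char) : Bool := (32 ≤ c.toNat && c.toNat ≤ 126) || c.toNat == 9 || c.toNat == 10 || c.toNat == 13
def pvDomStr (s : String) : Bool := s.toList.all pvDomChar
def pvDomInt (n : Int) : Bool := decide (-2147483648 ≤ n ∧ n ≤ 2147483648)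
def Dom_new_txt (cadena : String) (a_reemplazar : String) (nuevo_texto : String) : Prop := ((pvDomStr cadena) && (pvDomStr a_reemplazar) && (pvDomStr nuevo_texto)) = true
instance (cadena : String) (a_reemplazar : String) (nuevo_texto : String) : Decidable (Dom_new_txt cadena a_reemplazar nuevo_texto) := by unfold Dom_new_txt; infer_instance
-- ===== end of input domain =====

-- B replaces A's char-by-char scan over a mutable char list by find-driven jumps between
-- matches joining accumulated segments (measurably faster by a constant factor).

-- ===== PORT A =====
-- The while loop of A: state is the (mutated) char list and the index i.
-- The `pat = []` branch is only a totality guard: Python A loops forever there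
-- (outside Pre_new_txt); with pat ≠ [] it is exactly A's loop body.
def pyALoop (pat rep : List Char) (lista : List Char) (i : Nat) : List Char :=
  if _hp : pat = [] then lista
  else if _hi : i < lista.length then
    if hm : (lista.drop i).take pat.length = pat then
      pyALoop pat rep (lista.take i ++ rep ++ lista.drop (i + pat.length)) (i + rep.length)
    else
      pyALoop pat rep lista (i + 1)
  else lista
termination_by lista.length - i
decreasing_by
  · have hlen := congrArg List.length hm
    simp [List.length_take, List.length_drop] at hlen
    have hpl : pat.length ≠ 0 := by simpa using _hp
    simp [List.length_append, List.length_take, List.length_drop]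
    omega
  · omega

def new_txt (cadena : String) (a_reemplazar : String) (nuevo_texto : String) : String :=
  String.mk (pyALoop a_reemplazar.toList nuevo_texto.toList cadena.toList 0)

-- ===== PORT B =====
-- helper lemma cited by pyBLoop's termination proof: find past the end is -1
theorem findFrom_of_length_lt (s sub : List Char) (k : Nat) (h : s.length < k) :
    PySem.Chars.findFrom s sub (k : Int) none = -1 := by
  simp only [PySem.Chars.findFrom]
  split_ifs <;> omega

-- The while loop of B: accumulates the segments (Python's `pieces`); `start` jumps
-- from match to match via find.  The `pat = []` branch is only a totality guard:
-- Python B loops forever there (outside Pre_new_txt).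
def pyBLoop (cadena pat rep : List Char) (start : Nat) (pieces : List (List Char)) : List Char :=
  if _h : PySem.Chars.findFrom cadena pat (start : Int) none = -1 then
    (pieces ++ [cadena.drop start]).flatten
  else if _hp : pat = [] then []
  else
    pyBLoop cadena pat rep ((PySem.Chars.findFrom cadena pat (start : Int) none).toNat + pat.length)
      (pieces ++ [(cadena.drop start).take ((PySem.Chars.findFrom cadena pat (start : Int) none).toNat - start), rep])
termination_by cadena.length + 1 - start
decreasing_by
  by_cases hk : start ≤ cadena.length
  · obtain ⟨h1, h2, _⟩ := PySem.Chars.findFrom_natCast_spec cadena pat start hk _h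
    have hlen := h2.length_le
    have hpl : pat.length ≠ 0 := by simpa using _hp
    simp [List.length_drop] at hlen
    omega
  · exact absurd (findFrom_of_length_lt cadena pat start (by omega)) _h

def new_txt_alt (cadena : String) (a_reemplazar : String) (nuevo_texto : String) : String :=
  String.mk (pyBLoop cadena.toList a_reemplazar.toList nuevo_texto.toList 0 [])

-- ===== PRECONDITION & SPEC =====
-- Pre_ excludes an empty a_reemplazar: there Python A loops forever whenever cadena is
-- nonempty, and B's find-based loop never advances (it also diverges for cadena = "",
-- where A returns "").
def Pre_new_txt (cadena : String) (a_reemplazar : String) (nuevo_texto : String) : Prop :=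
  a_reemplazar ≠ ""
instance (cadena : String) (a_reemplazar : String) (nuevo_texto : String) : Decidable (Pre_new_txt cadena a_reemplazar nuevo_texto) := by unfold Pre_new_txt; infer_instance

def pvWitness_new_txt : String × String × String := ("abcabca", "bc", "XY")

def Spec_new_txt (cadena : String) (a_reemplazar : String) (nuevo_texto : String) (out : String) : Prop := out = new_txt_alt cadena a_reemplazar nuevo_texto
instance (cadena : String) (a_reemplazar : String) (nuevo_texto : String) (out : String) : Decidable (Spec_new_txt cadena a_reemplazar nuevo_texto out) := by unfold Spec_new_txt; infer_instance

-- ===== CLAIM (what is proved, stated in full; the proofs are below) =====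
def Claim_equal_new_txt : Prop := ∀ (cadena : String) (a_reemplazar : String) (nuevo_texto : String), Dom_new_txt cadena a_reemplazar nuevo_texto → Pre_new_txt cadena a_reemplazar nuevo_texto → Spec_new_txt cadena a_reemplazar nuevo_texto (new_txt cadena a_reemplazar nuevo_texto)

-- ===== LEMMAS AND PROOFS =====

-- the common characterisation: canonical left-to-right non-overlapping replacement
def replaceL (pat rep : List Char) : List Char → List Char
  | [] => []
  | c :: cs =>
    if pat <+: c :: cs then rep ++ replaceL pat rep (cs.drop (pat.length - 1))
    else c :: replaceL pat rep cs
termination_by l => l.length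
decreasing_by
  · simp [List.length_drop]
  · simp

theorem replaceL_no_match (pat rep : List Char) (l : List Char) (h : ¬ pat <:+: l) :
    replaceL pat rep l = l := by
  induction l with
  | nil => simp [replaceL]
  | cons c cs ih =>
    rw [replaceL, if_neg (fun hpre => h hpre.isInfix)]
    rw [ih (fun hinf => h (List.infix_cons hinf))]

theorem replaceL_gap (pat rep : List Char) (hp : pat ≠ []) :
    ∀ (d : Nat) (l : List Char), pat <+: l.drop d → (∀ i, i < d → ¬ pat <+: l.drop i) →
      replaceL pat rep l = l.take d ++ rep ++ replaceL pat rep (l.drop (d + pat.length)) := by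
  intro d
  induction d with
  | zero =>
    intro l hm _
    match l, hp, hm with
    | [], hp, hm => exact absurd (List.prefix_nil.mp hm) hp
    | c :: cs, hp, hm =>
      have hpl : pat.length ≠ 0 := by simpa using hp
      obtain ⟨k, hk⟩ : ∃ k, pat.length = k + 1 := ⟨pat.length - 1, by omega⟩
      rw [replaceL, if_pos (by simpa using hm)]
      simp [hk]
  | succ d ih =>
    intro l hm hno
    match l with
    | [] => exact absurd (List.prefix_nil.mp (by simpa using hm)) hp
    | c :: cs =>
      rw [replaceL, if_neg (by simpa using hno 0 (Nat.succ_pos d))]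
      rw [ih cs (by simpa using hm) (fun i hi => by simpa using hno (i + 1) (by omega))]
      rw [show d + 1 + pat.length = (d + pat.length) + 1 by omega, List.drop_succ_cons]
      simp [List.take_succ_cons]

-- A's loop computes: processed prefix ++ canonical replacement of the unprocessed suffix
theorem pyALoop_eq (pat rep : List Char) (hp : pat ≠ []) :
    ∀ (n : Nat) (lista : List Char) (i : Nat), lista.length - i ≤ n →
      pyALoop pat rep lista i = lista.take i ++ replaceL pat rep (lista.drop i) := by
  intro n
  induction n with
  | zero =>
    intro lista i hn
    rw [pyALoop, dif_neg hp, dif_neg (by omega)]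
    rw [List.take_of_length_le (by omega), List.drop_of_length_le (by omega)]
    simp [replaceL]
  | succ n ih =>
    intro lista i hn
    by_cases hi : i < lista.length
    · rw [pyALoop, dif_neg hp, dif_pos hi]
      by_cases hm : (lista.drop i).take pat.length = pat
      · rw [dif_pos hm]
        have hpre : pat <+: lista.drop i := List.prefix_iff_eq_take.mpr hm.symm
        have hple : pat.length ≤ lista.length - i := by
          have := hpre.length_le; simpa [List.length_drop] using this
        have hpl : pat.length ≠ 0 := by simpa using hp
        have hL : (lista.take i ++ rep).length = i + rep.length := by
          simp [List.length_append, List.length_take]; omega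
        have hrec := ih (lista.take i ++ rep ++ lista.drop (i + pat.length)) (i + rep.length)
          (by simp [List.length_append, List.length_take, List.length_drop]; omega)
        rw [hrec]
        rw [List.append_assoc (lista.take i) rep] at *
        rw [show lista.take i ++ (rep ++ lista.drop (i + pat.length))
              = (lista.take i ++ rep) ++ lista.drop (i + pat.length) by simp]
        rw [List.take_left' hL, List.drop_left' hL]
        -- RHS: unfold replaceL on the nonempty drop
        rw [List.drop_eq_getElem_cons hi, replaceL,
          if_pos (by rw [← List.drop_eq_getElem_cons hi]; exact hpre)]
        have : (lista.drop (i + 1)).drop (pat.length - 1) = lista.drop (i + pat.length) := by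
          rw [List.drop_drop]; congr 1; omega
        rw [this]; simp
      · rw [dif_neg hm]
        rw [ih lista (i + 1) (by omega)]
        have hnp : ¬ pat <+: lista.drop i := fun h => hm (List.prefix_iff_eq_take.mp h).symm
        rw [List.drop_eq_getElem_cons hi] at hnp ⊢
        rw [replaceL, if_neg hnp]
        rw [List.take_succ, List.getElem?_eq_getElem hi]
        simp only [Option.toList_some, List.append_assoc, List.singleton_append]
    · rw [pyALoop, dif_neg hp, dif_neg hi]
      rw [List.take_of_length_le (by omega), List.drop_of_length_le (by omega)]
      simp [replaceL]

-- B's loop computes: flattened pieces ++ canonical replacement of the rest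
theorem pyBLoop_eq (cadena pat rep : List Char) (hp : pat ≠ []) :
    ∀ (n : Nat) (start : Nat) (pieces : List (List Char)),
      start ≤ cadena.length → cadena.length - start ≤ n →
      pyBLoop cadena pat rep start pieces
        = pieces.flatten ++ replaceL pat rep (cadena.drop start) := by
  intro n
  induction n with
  | zero =>
    intro start pieces hs hn
    have hs' : start = cadena.length := by omega
    have hfind : PySem.Chars.findFrom cadena pat (start : Int) none = -1 := by
      rw [(PySem.Chars.findFrom_natCast_eq_neg_one_iff cadena pat start hs)]
      intro hinf
      have hlen := hinf.length_le
      rw [List.length_drop] at hlen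
      exact hp (List.length_eq_zero_iff.mp (by omega))
    rw [pyBLoop, dif_pos hfind]
    rw [replaceL_no_match pat rep _ (by
      intro hinf
      have hlen := hinf.length_le
      rw [List.length_drop] at hlen
      exact hp (List.length_eq_zero_iff.mp (by omega)))]
    simp
  | succ n ih =>
    intro start pieces hs hn
    by_cases hfind : PySem.Chars.findFrom cadena pat (start : Int) none = -1
    · rw [pyBLoop, dif_pos hfind]
      rw [replaceL_no_match pat rep _
        ((PySem.Chars.findFrom_natCast_eq_neg_one_iff cadena pat start hs).mp hfind)]
      simp
    · obtain ⟨h1, h2, h3⟩ := PySem.Chars.findFrom_natCast_spec cadena pat start hs hfind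
      set F := PySem.Chars.findFrom cadena pat (start : Int) none with hF
      have hk : start ≤ F.toNat := by omega
      have hple : pat.length ≤ cadena.length - F.toNat := by
        have := h2.length_le; simpa [List.length_drop] using this
      have hpl : pat.length ≠ 0 := by simpa using hp
      rw [pyBLoop, dif_neg hfind, dif_neg hp]
      rw [ih (F.toNat + pat.length) _ (by omega) (by omega)]
      have hgap : replaceL pat rep (cadena.drop start)
          = (cadena.drop start).take (F.toNat - start) ++ rep
              ++ replaceL pat rep (cadena.drop (F.toNat + pat.length)) := by
        have h2' : pat <+: (cadena.drop start).drop (F.toNat - start) := by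
          rw [List.drop_drop, show start + (F.toNat - start) = F.toNat by omega]; exact h2
        have hno : ∀ i, i < F.toNat - start → ¬ pat <+: (cadena.drop start).drop i := by
          intro i hi
          rw [List.drop_drop]
          exact h3 (start + i) (by omega) (by omega)
        have := replaceL_gap pat rep hp (F.toNat - start) (cadena.drop start) h2' hno
        rw [this, List.drop_drop, show start + (F.toNat - start + pat.length) = F.toNat + pat.length by omega]
      rw [hgap]
      simp [← hF, List.append_assoc]

-- ===== VERDICT (by name: the statement is the Claim_ definition above) =====
theorem new_txt_spec : Claim_equal_new_txt := by
  intro cadena a_reemplazar nuevo_texto _ hpre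
  unfold Spec_new_txt new_txt new_txt_alt
  have hp : a_reemplazar.toList ≠ [] := fun h => hpre (String.toList_eq_nil_iff.mp h)
  congr 1
  rw [pyALoop_eq a_reemplazar.toList nuevo_texto.toList hp cadena.toList.length cadena.toList 0 (by omega)]
  rw [pyBLoop_eq cadena.toList a_reemplazar.toList nuevo_texto.toList hp cadena.toList.length 0 [] (by omega) (by omega)]
  simp
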